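-- pv_equiv track=rewrite | github.com/Srikar-D-Palmite/PrimePlanner | app.py | add_space_after_single_numbers
-- ===== SOURCE A (Python) =====
-- def add_space_after_single_numbers(input_string):
--     result = ""
--     i = 0
--     while i < len(input_string):
--         if input_string[i].isdigit() and (i == 0 or not input_string[i - 1].isdigit()) and (i == len(input_string) - 1 or not input_string[i + 1].isdigit()):
--             result += input_string[i] + " "
--         else:
--             result += input_string[i]
--         i += 1
--     return result
-- ===== SOURCE B (Python) =====
-- def add_space_after_single_numbers(input_string):
--     out = []
--     n = len(input_string)
--     i = 0
--     while i < n: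
--         c = input_string[i]
--         if c.isdigit():
--             j = i + 1
--             while j < n and input_string[j].isdigit():
--                 j += 1
--             run = input_string[i:j]
--             out.append(run + " " if len(run) == 1 else run)
--             i = j
--         else:
--             out.append(c)
--             i += 1
--     return "".join(out)
-- ===== Notes on version B (the rewrite author's own statement) =====
-- stated objective: faster
-- what changed: B splits the string into maximal digit runs and appends a space exactly to runs of length 1, instead of A's per-character test of both index neighbors; output is accumulated in a list and joined once rather than built by repeated string concatenation.
import Mathlib
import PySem

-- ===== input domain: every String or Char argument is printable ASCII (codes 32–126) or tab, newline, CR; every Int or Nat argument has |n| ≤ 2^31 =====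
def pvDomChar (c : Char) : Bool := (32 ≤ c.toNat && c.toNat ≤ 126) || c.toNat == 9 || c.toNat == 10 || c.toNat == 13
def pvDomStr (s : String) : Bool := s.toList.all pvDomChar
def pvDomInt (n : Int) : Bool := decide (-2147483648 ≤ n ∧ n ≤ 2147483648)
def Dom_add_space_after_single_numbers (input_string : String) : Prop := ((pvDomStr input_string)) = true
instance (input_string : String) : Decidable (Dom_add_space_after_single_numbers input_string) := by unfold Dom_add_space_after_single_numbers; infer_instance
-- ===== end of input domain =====

-- B classifies maximal digit runs by length (space after runs of length 1) instead of A's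
-- per-character neighbor test; same return value, alternative decomposition.

-- ===== PORT A =====
-- A: while loop over index i; the in-range accesses s[i-1], s[i], s[i+1] are ported with
-- List.getD (the guards i == 0 / i == len-1 make the default char unreachable, exact).
def goA_add_space (s : List Char) (i : Nat) (result : List Char) : List Char :=
  if _h : i < s.length then
    if PySem.Chars.isdigit (s.getD i ' ')
        && (decide (i = 0) || !PySem.Chars.isdigit (s.getD (i - 1) ' '))
        && (decide (i = s.length - 1) || !PySem.Chars.isdigit (s.getD (i + 1) ' '))
    then goA_add_space s (i + 1) (result ++ [s.getD i ' ', ' '])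
    else goA_add_space s (i + 1) (result ++ [s.getD i ' '])
  else result
termination_by s.length - i

def add_space_after_single_numbers (input_string : String) : String :=
  String.mk (goA_add_space input_string.toList 0 [])

-- ===== PORT B =====
-- inner while loop of B: split off the maximal leading digit run
def spanDigits : List Char → List Char × List Char
  | [] => ([], [])
  | c :: rest =>
      if PySem.Chars.isdigit c then
        let p := spanDigits rest
        (c :: p.1, p.2)
      else ([], c :: rest)

theorem spanDigits_snd_length_le (l : List Char) : (spanDigits l).2.length ≤ l.length := by
  induction l with
  | nil => simp [spanDigits]
  | cons c rest ih =>
      simp only [spanDigits]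
      split <;> simp <;> omega

def goB_add_space : List Char → List (List Char)
  | [] => []
  | c :: rest =>
      if PySem.Chars.isdigit c then
        let p := spanDigits rest
        (if p.1.length = 0 then [c, ' '] else c :: p.1) :: goB_add_space p.2
      else [c] :: goB_add_space rest
termination_by l => l.length
decreasing_by
  · have := spanDigits_snd_length_le rest; simp only [List.length_cons]; omega
  · simp

def add_space_after_single_numbers_alt (input_string : String) : String :=
  String.mk (PySem.Chars.join [] (goB_add_space input_string.toList))

-- ===== PRECONDITION & SPEC =====
def Spec_add_space_after_single_numbers (input_string : String) (out : String) : Prop := out = add_space_after_single_numbers_alt input_string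
instance (input_string : String) (out : String) : Decidable (Spec_add_space_after_single_numbers input_string out) := by unfold Spec_add_space_after_single_numbers; infer_instance

-- ===== CLAIM (what is proved, stated in full; the proofs are below) =====
def Claim_equal_add_space_after_single_numbers : Prop := ∀ (input_string : String), Dom_add_space_after_single_numbers input_string → Spec_add_space_after_single_numbers input_string (add_space_after_single_numbers input_string)

-- ===== LEMMAS AND PROOFS =====

theorem isdigit_space : PySem.Chars.isdigit ' ' = false := by decide

-- A rewritten structurally: prev = "previous char exists and is a digit"
def gA_list : Bool → List Char → List Char → List Char
  | _, [], r => r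
  | prev, c :: rest, r =>
      if PySem.Chars.isdigit c && !prev && !PySem.Chars.isdigit (rest.getD 0 ' ')
      then gA_list true rest (r ++ [c, ' '])
      else gA_list (PySem.Chars.isdigit c) rest (r ++ [c])

theorem goA_eq_gA_list (fuel : Nat) :
    ∀ (s : List Char) (i : Nat) (r : List Char), s.length - i ≤ fuel →
      goA_add_space s i r
        = gA_list (decide (i ≠ 0) && PySem.Chars.isdigit (s.getD (i - 1) ' ')) (s.drop i) r := by
  induction fuel with
  | zero =>
      intro s i r hf
      have hle : s.length ≤ i := by omega
      rw [List.drop_eq_nil_of_le hle, goA_add_space]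
      simp [Nat.not_lt.mpr hle, gA_list]
  | succ n ih =>
      intro s i r hf
      by_cases h : i < s.length
      · have hdrop : s.drop i = s[i] :: s.drop (i + 1) := List.drop_eq_getElem_cons h
        have hgi : s.getD i ' ' = s[i] := List.getD_eq_getElem s ' ' h
        have hnext : (decide (i = s.length - 1) || !PySem.Chars.isdigit (s.getD (i + 1) ' '))
            = !PySem.Chars.isdigit ((s.drop (i + 1)).getD 0 ' ') := by
          by_cases h2 : i + 1 < s.length
          · have he : (s.drop (i + 1)).getD 0 ' ' = s.getD (i + 1) ' ' := by
              rw [List.getD_eq_getElem?_getD, List.getD_eq_getElem?_getD, List.getElem?_drop]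
            have hd : decide (i = s.length - 1) = false := by simp; omega
            rw [he, hd, Bool.false_or]
          · have hE : s.drop (i + 1) = [] := List.drop_eq_nil_of_le (by omega)
            have hd : decide (i = s.length - 1) = true := by simp; omega
            simp [hE, hd, isdigit_space]
        have hmid : (decide (i = 0) || !PySem.Chars.isdigit (s.getD (i - 1) ' '))
            = !(decide (i ≠ 0) && PySem.Chars.isdigit (s.getD (i - 1) ' ')) := by
          by_cases h0 : i = 0 <;> simp [h0]
        rw [goA_add_space, dif_pos h, hdrop]
        simp only [gA_list]
        rw [hgi, hmid, hnext]
        have hf' : s.length - (i + 1) ≤ n := by omega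
        split
        next hcond =>
          have hdig : PySem.Chars.isdigit s[i] = true := by
            cases hdig : PySem.Chars.isdigit s[i] <;> simp [hdig] at hcond ⊢
          rw [ih s (i + 1) _ hf']
          congr 1
          simp [List.getD_eq_getElem?_getD, List.getElem?_eq_getElem h, hdig]
        next hcond =>
          rw [ih s (i + 1) _ hf']
          congr 1
          simp [List.getD_eq_getElem?_getD, List.getElem?_eq_getElem h]
      · rw [List.drop_eq_nil_of_le (by omega), goA_add_space]
        simp [h, gA_list]


theorem spanDigits_of_head_not (l : List Char)
    (h : PySem.Chars.isdigit (l.getD 0 ' ') = false) : spanDigits l = ([], l) := by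
  cases l with
  | nil => rfl
  | cons c rest => simp only [List.getD_cons_zero] at h; simp [spanDigits, h]

theorem spanDigits_snd_head_not (l : List Char) :
    PySem.Chars.isdigit ((spanDigits l).2.getD 0 ' ') = false := by
  induction l with
  | nil => simpa [spanDigits] using isdigit_space
  | cons c rest ih =>
      by_cases h : PySem.Chars.isdigit c = true
      · simpa [spanDigits, h] using ih
      · simp only [Bool.not_eq_true] at h
        simp [spanDigits, h]

theorem join_nil_cons (a : List Char) (rest : List (List Char)) :
    PySem.Chars.join [] (a :: rest) = a ++ PySem.Chars.join [] rest := by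
  cases rest with
  | nil => simp [PySem.Chars.join_singleton, PySem.Chars.join_nil]
  | cons b t => simpa using PySem.Chars.join_cons_cons [] a b t

-- running through a digit run with a digit predecessor appends the run verbatim
theorem gA_run (l : List Char) : ∀ (r : List Char),
    gA_list true l r = gA_list true (spanDigits l).2 (r ++ (spanDigits l).1) := by
  induction l with
  | nil => intro r; simp [spanDigits]
  | cons c rest ih =>
      intro r
      by_cases h : PySem.Chars.isdigit c = true
      · simp only [gA_list, h, Bool.not_true, Bool.and_false, Bool.false_and,
          if_neg Bool.false_ne_true, spanDigits]
        rw [ih]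
        simp
      · simp only [Bool.not_eq_true] at h
        simp [gA_list, h, spanDigits]

theorem gA_eq_goB (fuel : Nat) :
    ∀ (l : List Char) (prev : Bool) (r : List Char), l.length ≤ fuel →
      (prev = true → PySem.Chars.isdigit (l.getD 0 ' ') = false) →
      gA_list prev l r = r ++ PySem.Chars.join [] (goB_add_space l) := by
  induction fuel with
  | zero =>
      intro l prev r hf _
      have : l = [] := by cases l <;> simp_all
      subst this; simp [gA_list, goB_add_space, PySem.Chars.join_nil]
  | succ n ih =>
      intro l prev r hf hprev
      cases l with
      | nil => simp [gA_list, goB_add_space, PySem.Chars.join_nil]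
      | cons c rest =>
          by_cases hc : PySem.Chars.isdigit c = true
          · have hp : prev = false := by
              cases prev
              · rfl
              · exact absurd hc (by simpa using hprev rfl)
            subst hp
            by_cases hr : PySem.Chars.isdigit (rest.getD 0 ' ') = true
            · -- inside a run of length ≥ 2
              simp only [gA_list, hc, hr, Bool.not_true, Bool.not_false, Bool.and_false,
                Bool.true_and, if_neg Bool.false_ne_true]
              rw [gA_run]
              have hne : (spanDigits rest).1.length ≠ 0 := by
                cases rest with
                | nil => simp at hr; exact absurd hr (by simpa using isdigit_space)
                | cons d t =>
                    simp only [List.getD_cons_zero] at hr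
                    simp [spanDigits, hr]
              have hlen : (spanDigits rest).2.length ≤ n := by
                have := spanDigits_snd_length_le rest
                simp only [List.length_cons] at hf; omega
              rw [ih (spanDigits rest).2 true _ hlen (fun _ => spanDigits_snd_head_not rest)]
              simp only [goB_add_space, hc, if_pos, if_neg hne, join_nil_cons]
              simp
            · -- isolated digit
              simp only [Bool.not_eq_true] at hr
              simp only [gA_list, hc, hr, Bool.not_false, Bool.and_true, if_pos]
              have hlen : rest.length ≤ n := by simp only [List.length_cons] at hf; omega
              rw [ih rest true _ hlen (fun _ => hr)]
              have hsp : spanDigits rest = ([], rest) := spanDigits_of_head_not rest hr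
              simp only [goB_add_space, hc, hsp, if_pos, List.length_nil, join_nil_cons]
              simp
          · simp only [Bool.not_eq_true] at hc
            simp only [gA_list, hc, Bool.false_and, if_neg Bool.false_ne_true]
            have hlen : rest.length ≤ n := by simp only [List.length_cons] at hf; omega
            rw [ih rest false _ hlen (by simp)]
            simp only [goB_add_space, hc, Bool.false_eq_true, if_false]
            rw [join_nil_cons]; simp

-- ===== VERDICT (by name: the statement is the Claim_ definition above) =====
theorem add_space_after_single_numbers_spec : Claim_equal_add_space_after_single_numbers := by
  intro s _
  unfold Spec_add_space_after_single_numbers add_space_after_single_numbers add_space_after_single_numbers_alt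
  rw [goA_eq_gA_list (s.toList.length) s.toList 0 [] (by omega)]
  simp only [decide_eq_true_eq, Nat.zero_sub, List.drop_zero, ne_eq, not_true_eq_false,
    decide_false, Bool.false_and]
  rw [gA_eq_goB (s.toList.length) s.toList false [] (le_refl _) (by simp)]
  simp
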